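-- pv_equiv track=rewrite | github.com/polyseng/humanpose-annotation | main.py | countOcclusions
-- ===== SOURCE A (Python) =====
-- def countOcclusions(joints):
--     count = [0, 0]
--     for _, _, c in joints:
--         if int(c) == 0:  # Completely invisible
--             count[0] = count[0] + 1
--         elif int(c) == 1:  # Partially invisible (and inferrable)
--             count[1] = count[1] + 1
--         else:  # Fully visible
--             continue
--     return tuple(count)
-- ===== SOURCE B (Python) =====
-- def countOcclusions(joints):
--     def go(lo, hi):
--         if hi <= lo:
--             return (0, 0)
--         if hi - lo == 1:
--             c = int(joints[lo][2])
--             return (1 if c == 0 else 0, 1 if c == 1 else 0)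
--         mid = lo + (hi - lo) // 2
--         z1, o1 = go(lo, mid)
--         z2, o2 = go(mid, hi)
--         return (z1 + z2, o1 + o2)
--     return go(0, len(joints))
-- ===== Notes on version B (the rewrite author's own statement) =====
-- stated objective: alternative
-- what changed: Replaces A's single-pass if/elif accumulator loop with a divide-and-conquer recursion that splits the index range in half, counts each half independently, and adds the two count pairs (correct because the counts are a sum over elements, hence associative over any split).
import Mathlib
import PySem

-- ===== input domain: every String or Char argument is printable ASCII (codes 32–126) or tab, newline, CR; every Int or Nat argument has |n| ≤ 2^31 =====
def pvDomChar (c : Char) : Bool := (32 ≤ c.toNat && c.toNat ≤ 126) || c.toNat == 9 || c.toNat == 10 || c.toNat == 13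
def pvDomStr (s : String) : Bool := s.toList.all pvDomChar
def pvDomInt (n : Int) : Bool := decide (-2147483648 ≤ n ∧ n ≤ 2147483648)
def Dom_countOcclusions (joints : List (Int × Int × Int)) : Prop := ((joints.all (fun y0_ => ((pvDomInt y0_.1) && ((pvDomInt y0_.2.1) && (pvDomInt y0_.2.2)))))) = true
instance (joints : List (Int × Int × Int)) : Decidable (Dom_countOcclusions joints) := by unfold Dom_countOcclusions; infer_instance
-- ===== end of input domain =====

-- ===== PORT A =====
-- B replaces A's single-pass if/elif accumulator loop with a divide-and-conquer recursion
-- over index ranges that sums the count pairs of the two halves (objective: alternative).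
def countOcclusions (joints : List (Int × Int × Int)) : Int × Int :=
  let count := joints.foldl (fun (count : Int × Int) t =>
    if t.2.2 == 0 then (count.1 + 1, count.2)
    else if t.2.2 == 1 then (count.1, count.2 + 1)
    else count) ((0 : Int), (0 : Int))
  count

-- ===== PORT B =====
-- go lo hi: counts of flags 0 and 1 among joints[lo:hi], by halving the range (as in Source B).
def countOccGo (joints : List (Int × Int × Int)) (lo hi : Nat) : Int × Int :=
  if hi ≤ lo then (0, 0)
  else if hi - lo = 1 then
    let c := (joints[lo]?.getD (0, 0, 0)).2.2
    ((if c = 0 then 1 else 0), (if c = 1 then 1 else 0))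
  else
    let mid := lo + (hi - lo) / 2
    let p := countOccGo joints lo mid
    let q := countOccGo joints mid hi
    (p.1 + q.1, p.2 + q.2)
termination_by hi - lo
decreasing_by
  · have h1 : (hi - lo) / 2 < hi - lo := Nat.div_lt_self (by omega) (by omega)
    omega
  · have h2 : 1 ≤ (hi - lo) / 2 := (Nat.le_div_iff_mul_le (by omega)).2 (by omega)
    omega

def countOcclusions_alt (joints : List (Int × Int × Int)) : Int × Int :=
  countOccGo joints 0 joints.length

-- ===== PRECONDITION & SPEC =====
def Spec_countOcclusions (joints : List (Int × Int × Int)) (out : Int × Int) : Prop := out = countOcclusions_alt joints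
instance (joints : List (Int × Int × Int)) (out : Int × Int) : Decidable (Spec_countOcclusions joints out) := by unfold Spec_countOcclusions; infer_instance

-- ===== CLAIM (what is proved, stated in full; the proofs are below) =====
def Claim_equal_countOcclusions : Prop := ∀ (joints : List (Int × Int × Int)), Dom_countOcclusions joints → Spec_countOcclusions joints (countOcclusions joints)

-- ===== LEMMAS AND PROOFS =====

-- A's fold computes the counts of 0 and 1 in the flag column, offset by the accumulator.
theorem foldl_counts (joints : List (Int × Int × Int)) (a b : Int) :
    joints.foldl (fun (count : Int × Int) t =>
      if t.2.2 == 0 then (count.1 + 1, count.2)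
      else if t.2.2 == 1 then (count.1, count.2 + 1)
      else count) (a, b)
    = (a + ((joints.map (fun t => t.2.2)).count 0 : Int),
       b + ((joints.map (fun t => t.2.2)).count 1 : Int)) := by
  induction joints generalizing a b with
  | nil => simp
  | cons hd t ih =>
    rw [List.foldl_cons]
    by_cases h0 : hd.2.2 = 0
    · rw [if_pos (by simp [h0]), ih]
      simp only [List.map_cons, List.count_cons, h0, Prod.mk.injEq]
      constructor <;> (push_cast; simp; try ring)
    · by_cases h1 : hd.2.2 = 1
      · rw [if_neg (by simp [h0]), if_pos (by simp [h1]), ih]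
        simp only [List.map_cons, List.count_cons, h1, Prod.mk.injEq]
        constructor <;> (push_cast; simp; try ring)
      · rw [if_neg (by simp [h0]), if_neg (by simp [h1]), ih]
        simp [h0, h1]

-- B's divide-and-conquer computes the counts of 0 and 1 in the flag column of the slice [lo, hi).
theorem countOccGo_counts (joints : List (Int × Int × Int)) :
    ∀ n lo hi, hi - lo = n → hi ≤ joints.length →
    countOccGo joints lo hi
      = (((((joints.drop lo).take (hi - lo)).map (fun t => t.2.2)).count 0 : Int),
         ((((joints.drop lo).take (hi - lo)).map (fun t => t.2.2)).count 1 : Int)) := by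
  intro n
  induction n using Nat.strong_induction_on with
  | _ n ih =>
    intro lo hi hn hlen
    subst hn
    rw [countOccGo]
    by_cases hle : hi ≤ lo
    · rw [if_pos hle]
      have : hi - lo = 0 := by omega
      simp [this]
    · rw [if_neg hle]
      by_cases h1 : hi - lo = 1
      · rw [if_pos h1]
        have hlt : lo < joints.length := by omega
        have hdrop : joints.drop lo = joints[lo] :: joints.drop (lo + 1) :=
          List.drop_eq_getElem_cons hlt
        rw [h1, hdrop]
        simp only [List.take_succ_cons, List.take_zero, List.map_cons, List.map_nil,
          List.count_cons, List.count_nil, List.getElem?_eq_getElem hlt, Option.getD_some,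
          Prod.mk.injEq, Nat.zero_add, beq_iff_eq]
        constructor <;> split_ifs <;> simp_all
      · rw [if_neg h1]
        have hd2 : (hi - lo) / 2 < hi - lo := Nat.div_lt_self (by omega) (by omega)
        have hd1 : 1 ≤ (hi - lo) / 2 := (Nat.le_div_iff_mul_le (by omega)).2 (by omega)
        set mid := lo + (hi - lo) / 2 with hmid
        have e1 := ih (mid - lo) (by omega) lo mid rfl (by omega)
        have e2 := ih (hi - mid) (by omega) mid hi rfl hlen
        have hsplit : (joints.drop lo).take (hi - lo)
            = (joints.drop lo).take (mid - lo) ++ ((joints.drop lo).drop (mid - lo)).take (hi - mid) := by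
          have : hi - lo = (mid - lo) + (hi - mid) := by omega
          rw [this, List.take_add]
        have hdd : (joints.drop lo).drop (mid - lo) = joints.drop mid := by
          rw [List.drop_drop]; congr 1; omega
        simp only [e1, e2]
        rw [hsplit, hdd]
        simp [List.count_append]

-- ===== VERDICT (by name: the statement is the Claim_ definition above) =====
theorem countOcclusions_spec : Claim_equal_countOcclusions := by
  intro joints _
  show countOcclusions joints = countOcclusions_alt joints
  unfold countOcclusions countOcclusions_alt
  rw [foldl_counts, countOccGo_counts joints joints.length 0 joints.length rfl (le_refl _)]
  simp
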